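-- pv_equiv track=rewrite | github.com/pypi-data/pypi-mirror-401 | packages/cce-agent/cce_agent-0.1.1.tar.gz/cce_agent-0.1.1/src/tools/commands/implement_plan.py | _extract_overview_summary
-- ===== SOURCE A (Python) =====
-- def _extract_overview_summary(plan_content: str, max_length: int) -> str:
--     """Extract overview and key requirements."""
--     lines = plan_content.split("\n")
--     summary_parts = []
--     current_length = 0
--
--     # Priority sections to extract
--     priority_sections = [
--         "## Overview",
--         "## Requirements",
--         "## Success Criteria",
--         "## Implementation",
--         "## Architecture",
--         "## Goals",
--     ]
--
--     in_priority_section = False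
--     section_content_lines = 0
--
--     for line in lines:
--         line = line.strip()
--         if not line:
--             continue
--
--         # Check if we're entering a priority section
--         if any(section in line for section in priority_sections):
--             in_priority_section = True
--             section_content_lines = 0
--             if current_length + len(line) + 1 <= max_length:
--                 summary_parts.append(line)
--                 current_length += len(line) + 1
--             continue
--
--         # Check if we're leaving a priority section (hit another ## header)
--         if line.startswith("##") and not any(section in line for section in priority_sections):
--             in_priority_section = False
--             continue
--
--         # Include content from priority sections (limit to 2-3 lines per section)
--         if in_priority_section and section_content_lines < 3:
--             if current_length + len(line) + 1 <= max_length: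
--                 summary_parts.append(f"  {line}")
--                 current_length += len(line) + 3
--                 section_content_lines += 1
--
--     if summary_parts:
--         return "\n".join(summary_parts)
--
--     return ""
-- ===== SOURCE B (Python) =====
-- def _extract_overview_summary(plan_content: str, max_length: int) -> str:
--     """Extract overview and key requirements (section-grouping implementation)."""
--     priority_sections = [
--         "## Overview",
--         "## Requirements",
--         "## Success Criteria",
--         "## Implementation",
--         "## Architecture",
--         "## Goals",
--     ]
--
--     def is_priority(s):
--         return any(p in s for p in priority_sections)
--
--     def is_boundary(s):
--         return s.startswith("##") or is_priority(s)
--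
--     lines = plan_content.split("\n")
--
--     # Pass 1: group the document into priority sections (header, content lines).
--     sections = []
--     i, n = 0, len(lines)
--     while i < n:
--         s = lines[i].strip()
--         if is_priority(s):
--             j = i + 1
--             while j < n and not is_boundary(lines[j].strip()):
--                 j += 1
--             content = [t.strip() for t in lines[i + 1:j] if t.strip()]
--             sections.append((s, content))
--             i = j
--         else:
--             i += 1
--
--     # Pass 2: spend the budget over the sections in document order.
--     parts = []
--     length = 0
--     for header, content in sections:
--         if length + len(header) + 1 <= max_length:
--             parts.append(header)
--             length += len(header) + 1
--         taken = 0
--         for c in content: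
--             if taken < 3 and length + len(c) + 1 <= max_length:
--                 parts.append("  " + c)
--                 length += len(c) + 3
--                 taken += 1
--     return "\n".join(parts)
-- ===== Notes on version B (the rewrite author's own statement) =====
-- stated objective: alternative
-- what changed: A's single stateful line loop (in_priority_section flag + per-section counter threaded through every line) is replaced by a two-pass decomposition: first group the document into (header, content-lines) sections, then spend the length budget over the sections in document order.
import Mathlib
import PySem

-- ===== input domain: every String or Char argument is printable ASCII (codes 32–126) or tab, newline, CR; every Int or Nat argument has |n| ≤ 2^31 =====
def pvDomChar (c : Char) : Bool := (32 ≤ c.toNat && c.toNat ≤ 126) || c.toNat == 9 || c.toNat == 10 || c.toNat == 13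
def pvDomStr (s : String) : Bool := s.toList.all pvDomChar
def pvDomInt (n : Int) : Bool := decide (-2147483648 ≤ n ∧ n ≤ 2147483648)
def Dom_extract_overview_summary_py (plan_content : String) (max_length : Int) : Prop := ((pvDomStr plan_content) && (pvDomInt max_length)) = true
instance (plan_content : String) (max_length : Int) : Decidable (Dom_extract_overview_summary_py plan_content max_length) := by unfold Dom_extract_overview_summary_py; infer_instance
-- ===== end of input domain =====

-- B regroups the single stateful line loop of A into two passes (group lines into priority
-- sections, then spend the budget section by section); same return value, objective: alternative decomposition.

-- ===== PORT A =====
def pvPriority : List String :=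
  ["## Overview", "## Requirements", "## Success Criteria",
   "## Implementation", "## Architecture", "## Goals"]

def pvIsPriority (s : String) : Bool := pvPriority.any (fun p => PySem.Str.isIn p s)

-- one iteration of A's `for line in lines` loop; state = (summary_parts, current_length, in_priority_section, section_content_lines)
def pvStepA (mx : Int) : (List String × Int × Bool × Nat) → String → (List String × Int × Bool × Nat)
  | (parts, len, inSec, cnt), line =>
    if PySem.Str.strip line = "" then (parts, len, inSec, cnt)
    else if pvIsPriority (PySem.Str.strip line) then
      if len + PySem.Str.len (PySem.Str.strip line) + 1 ≤ mx then
        (parts ++ [PySem.Str.strip line], len + PySem.Str.len (PySem.Str.strip line) + 1, true, 0)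
      else (parts, len, true, 0)
    else if PySem.Str.startswith (PySem.Str.strip line) "##" then (parts, len, false, cnt)
    else if inSec ∧ cnt < 3 then
      if len + PySem.Str.len (PySem.Str.strip line) + 1 ≤ mx then
        (parts ++ ["  " ++ PySem.Str.strip line], len + PySem.Str.len (PySem.Str.strip line) + 3, inSec, cnt + 1)
      else (parts, len, inSec, cnt)
    else (parts, len, inSec, cnt)

def extract_overview_summary_py (plan_content : String) (max_length : Int) : String :=
  let lines := (PySem.Str.split? plan_content "\n").getD []   -- sep "\n" ≠ "": split? never none
  let st := lines.foldl (pvStepA max_length) ([], 0, false, 0)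
  if st.1 ≠ [] then PySem.Str.join "\n" st.1 else ""

-- ===== PORT B =====
def pvIsBoundary (u : String) : Bool := PySem.Str.startswith u "##" || pvIsPriority u

def pvNotB (t : String) : Bool := !pvIsBoundary (PySem.Str.strip t)

-- pass 1 of B: group the lines into (header, cleaned content lines) sections
def pvSections : List String → List (String × List String)
  | [] => []
  | l :: rest =>
    let s := PySem.Str.strip l
    if pvIsPriority s then
      (s, ((rest.takeWhile pvNotB).map PySem.Str.strip).filter (fun u => u ≠ "")) ::
        pvSections (rest.dropWhile pvNotB)
    else pvSections rest
termination_by ls => ls.length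
decreasing_by
  · exact Nat.lt_succ_of_le (List.length_dropWhile_le _ _)
  · simp

-- pass 2 of B: inner content loop
def pvAddContent (mx : Int) : (List String × Int × Nat) → String → (List String × Int × Nat)
  | (parts, len, taken), c =>
    if taken < 3 ∧ len + PySem.Str.len c + 1 ≤ mx then
      (parts ++ ["  " ++ c], len + PySem.Str.len c + 3, taken + 1)
    else (parts, len, taken)

-- pass 2 of B: one section
def pvEmit (mx : Int) : (List String × Int) → (String × List String) → (List String × Int)
  | (parts, len), (header, content) =>
    let st1 := if len + PySem.Str.len header + 1 ≤ mx
               then (parts ++ [header], len + PySem.Str.len header + 1) else (parts, len)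
    let r := content.foldl (pvAddContent mx) (st1.1, st1.2, 0)
    (r.1, r.2.1)

def extract_overview_summary_py_alt (plan_content : String) (max_length : Int) : String :=
  let lines := (PySem.Str.split? plan_content "\n").getD []
  let st := (pvSections lines).foldl (pvEmit max_length) ([], 0)
  PySem.Str.join "\n" st.1

-- ===== PRECONDITION & SPEC =====
def Spec_extract_overview_summary_py (plan_content : String) (max_length : Int) (out : String) : Prop := out = extract_overview_summary_py_alt plan_content max_length
instance (plan_content : String) (max_length : Int) (out : String) : Decidable (Spec_extract_overview_summary_py plan_content max_length out) := by unfold Spec_extract_overview_summary_py; infer_instance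

-- ===== CLAIM (what is proved, stated in full; the proofs are below) =====
def Claim_equal_extract_overview_summary_py : Prop := ∀ (plan_content : String) (max_length : Int), Dom_extract_overview_summary_py plan_content max_length → Spec_extract_overview_summary_py plan_content max_length (extract_overview_summary_py plan_content max_length)

-- ===== LEMMAS AND PROOFS =====

-- projection of A's loop state to B's (parts, length) state
def pvProj (st : List String × Int × Bool × Nat) : List String × Int := (st.1, st.2.1)

-- the loop-correspondence invariant: out of a section A's remaining loop is B's fold over the
-- remaining sections; inside a section it first replays B's content fold over the span prefix.
def pvClean (ls : List String) : List String :=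
  (ls.map PySem.Str.strip).filter (fun u => u ≠ "")

def pvRunContent (mx : Int) (st : List String × Int) (cnt : Nat) (content : List String) : List String × Int :=
  let r := content.foldl (pvAddContent mx) (st.1, st.2, cnt)
  (r.1, r.2.1)

theorem pvPriority_ne_empty : pvIsPriority "" = false := by decide

theorem pvMain (mx : Int) : ∀ (n : Nat) (lines : List String), lines.length ≤ n →
    (∀ parts len cnt,
      pvProj (lines.foldl (pvStepA mx) (parts, len, false, cnt))
        = (pvSections lines).foldl (pvEmit mx) (parts, len))
    ∧ (∀ parts len cnt,
      pvProj (lines.foldl (pvStepA mx) (parts, len, true, cnt))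
        = (pvSections (lines.dropWhile pvNotB)).foldl (pvEmit mx)
            (pvRunContent mx (parts, len) cnt (pvClean (lines.takeWhile pvNotB)))) := by
  intro n
  induction n with
  | zero =>
    intro lines hlen
    have hnil : lines = [] := List.eq_nil_of_length_eq_zero (Nat.le_zero.mp hlen)
    subst hnil
    constructor <;> intro parts len cnt <;>
      simp [pvSections, pvProj, pvRunContent, pvClean]
  | succ n ih =>
    intro lines hlen
    match lines with
    | [] =>
      constructor <;> intro parts len cnt <;>
        simp [pvSections, pvProj, pvRunContent, pvClean]
    | l :: rest =>
      have hr : rest.length ≤ n := by simpa using Nat.succ_le_succ_iff.mp (by simpa using hlen)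
      obtain ⟨ihF, ihT⟩ := ih rest hr
      by_cases h0 : PySem.Str.strip l = ""
      · constructor
        · intro parts len cnt
          rw [List.foldl_cons]
          have hstep : pvStepA mx (parts, len, false, cnt) l = (parts, len, false, cnt) := by
            simp [pvStepA, h0]
          rw [hstep, ihF]
          have hsec : pvSections (l :: rest) = pvSections rest := by
            rw [pvSections]; simp [h0, pvPriority_ne_empty]
          rw [hsec]
        · intro parts len cnt
          rw [List.foldl_cons]
          have hstep : pvStepA mx (parts, len, true, cnt) l = (parts, len, true, cnt) := by
            simp [pvStepA, h0]
          have hnb : pvNotB l = true := by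
            simp [pvNotB, pvIsBoundary, h0, pvPriority_ne_empty]
            decide
          rw [hstep, ihT, List.dropWhile_cons, List.takeWhile_cons]
          simp only [hnb, if_pos]
          have hcl : pvClean (l :: rest.takeWhile pvNotB) = pvClean (rest.takeWhile pvNotB) := by
            simp [pvClean, h0]
          rw [hcl]
      · by_cases h1 : pvIsPriority (PySem.Str.strip l) = true
        · -- priority header line: a new section opens in both versions
          have hnb : pvNotB l = false := by simp [pvNotB, pvIsBoundary, h1]
          have hsec : pvSections (l :: rest)
              = (PySem.Str.strip l, pvClean (rest.takeWhile pvNotB))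
                  :: pvSections (rest.dropWhile pvNotB) := by
            rw [pvSections]; simp [h1, pvClean]
          have key : ∀ parts len (inSec : Bool) cnt,
              pvProj (List.foldl (pvStepA mx) (parts, len, inSec, cnt) (l :: rest))
                = List.foldl (pvEmit mx) (parts, len) (pvSections (l :: rest)) := by
            intro parts len inSec cnt
            rw [List.foldl_cons, hsec, List.foldl_cons]
            by_cases hbud : len + PySem.Str.len (PySem.Str.strip l) + 1 ≤ mx
            · have hstep : pvStepA mx (parts, len, inSec, cnt) l
                  = (parts ++ [PySem.Str.strip l],
                     len + PySem.Str.len (PySem.Str.strip l) + 1, true, 0) := by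
                simp only [pvStepA]; rw [if_neg h0, if_pos h1, if_pos hbud]
              rw [hstep, ihT]
              have hemit : pvEmit mx (parts, len)
                    (PySem.Str.strip l, pvClean (rest.takeWhile pvNotB))
                  = pvRunContent mx
                      (parts ++ [PySem.Str.strip l],
                       len + PySem.Str.len (PySem.Str.strip l) + 1) 0
                      (pvClean (rest.takeWhile pvNotB)) := by
                simp only [pvEmit, pvRunContent]; rw [if_pos hbud]
              rw [hemit]
            · have hstep : pvStepA mx (parts, len, inSec, cnt) l = (parts, len, true, 0) := by
                simp only [pvStepA]; rw [if_neg h0, if_pos h1, if_neg hbud]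
              rw [hstep, ihT]
              have hemit : pvEmit mx (parts, len)
                    (PySem.Str.strip l, pvClean (rest.takeWhile pvNotB))
                  = pvRunContent mx (parts, len) 0 (pvClean (rest.takeWhile pvNotB)) := by
                simp only [pvEmit, pvRunContent]; rw [if_neg hbud]
              rw [hemit]
          constructor
          · intro parts len cnt; exact key parts len false cnt
          · intro parts len cnt
            rw [key parts len true cnt, List.dropWhile_cons, List.takeWhile_cons]
            simp [hnb, pvClean, pvRunContent]
        · by_cases h2 : PySem.Str.startswith (PySem.Str.strip l) "##" = true
          · -- non-priority header: the section closes in both versions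
            have h2c : PySem.Chars.startswith (PySem.Chars.strip l.toList) ['#', '#'] = true := by
              simpa using h2
            have hnb : pvNotB l = false := by simp [pvNotB, pvIsBoundary, h2c]
            have hsec : pvSections (l :: rest) = pvSections rest := by
              rw [pvSections]; simp [h1]
            have hstep : ∀ parts len (inSec : Bool) cnt,
                pvStepA mx (parts, len, inSec, cnt) l = (parts, len, false, cnt) := by
              intro parts len inSec cnt
              simp only [pvStepA]; rw [if_neg h0, if_neg h1, if_pos h2]
            constructor
            · intro parts len cnt
              rw [List.foldl_cons, hstep, ihF, hsec]
            · intro parts len cnt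
              rw [List.foldl_cons, hstep, ihF, List.dropWhile_cons, List.takeWhile_cons]
              simp [hnb, pvClean, pvRunContent, hsec]
          · -- plain content line
            have h1c : pvIsPriority (PySem.Str.strip l) = false := by
              simpa using h1
            have h2c : PySem.Chars.startswith (PySem.Chars.strip l.toList) ['#', '#'] = false := by
              have := (Bool.not_eq_true _).mp h2; simpa using this
            have hnb : pvNotB l = true := by
              simp [pvNotB, pvIsBoundary, h1c, h2c]
            have hsec : pvSections (l :: rest) = pvSections rest := by
              rw [pvSections]; simp [h1]
            constructor
            · intro parts len cnt
              have hstep : pvStepA mx (parts, len, false, cnt) l = (parts, len, false, cnt) := by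
                simp only [pvStepA]; rw [if_neg h0, if_neg h1, if_neg h2]; simp
              rw [List.foldl_cons, hstep, ihF, hsec]
            · intro parts len cnt
              have hstep : pvStepA mx (parts, len, true, cnt) l
                  = ((pvAddContent mx (parts, len, cnt) (PySem.Str.strip l)).1,
                     (pvAddContent mx (parts, len, cnt) (PySem.Str.strip l)).2.1, true,
                     (pvAddContent mx (parts, len, cnt) (PySem.Str.strip l)).2.2) := by
                simp only [pvStepA, pvAddContent]; rw [if_neg h0, if_neg h1, if_neg h2]
                by_cases hc : cnt < 3
                · by_cases hbud : len + PySem.Str.len (PySem.Str.strip l) + 1 ≤ mx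
                  · rw [if_pos ⟨trivial, hc⟩, if_pos hbud, if_pos ⟨hc, hbud⟩]
                  · rw [if_pos ⟨trivial, hc⟩, if_neg hbud, if_neg (fun h => hbud h.2)]
                · rw [if_neg (fun h => hc h.2), if_neg (fun h => hc h.1)]
              rw [List.foldl_cons, hstep, ihT, List.takeWhile_cons, List.dropWhile_cons]
              simp only [hnb, if_pos]
              have hcl : pvClean (l :: rest.takeWhile pvNotB)
                  = PySem.Str.strip l :: pvClean (rest.takeWhile pvNotB) := by
                simp [pvClean, h0]
              rw [hcl]
              have hrun : pvRunContent mx (parts, len) cnt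
                    (PySem.Str.strip l :: pvClean (rest.takeWhile pvNotB))
                  = pvRunContent mx
                      ((pvAddContent mx (parts, len, cnt) (PySem.Str.strip l)).1,
                       (pvAddContent mx (parts, len, cnt) (PySem.Str.strip l)).2.1)
                      ((pvAddContent mx (parts, len, cnt) (PySem.Str.strip l)).2.2)
                      (pvClean (rest.takeWhile pvNotB)) := by
                simp [pvRunContent]
              rw [hrun]

theorem extract_overview_summary_py_eq (plan_content : String) (max_length : Int) :
    extract_overview_summary_py plan_content max_length
      = extract_overview_summary_py_alt plan_content max_length := by
  unfold extract_overview_summary_py extract_overview_summary_py_alt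
  have h := (pvMain max_length ((PySem.Str.split? plan_content "\n").getD []).length
      ((PySem.Str.split? plan_content "\n").getD []) le_rfl).1 [] 0 0
  have h1 : (List.foldl (pvStepA max_length) ([], 0, false, 0)
        ((PySem.Str.split? plan_content "\n").getD [])).1
      = (List.foldl (pvEmit max_length) ([], 0)
          (pvSections ((PySem.Str.split? plan_content "\n").getD []))).1 :=
    congrArg Prod.fst h
  by_cases hz : (List.foldl (pvStepA max_length) ([], 0, false, 0)
      ((PySem.Str.split? plan_content "\n").getD [])).1 = []
  · simp only [hz] at h1
    simp [hz, ← h1]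
    decide
  · simp only []
    rw [if_pos hz, h1]

-- ===== VERDICT (by name: the statement is the Claim_ definition above) =====
theorem extract_overview_summary_py_spec : Claim_equal_extract_overview_summary_py := by
  intro pc mx _
  exact extract_overview_summary_py_eq pc mx
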